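-- pv_equiv track=rewrite | github.com/an2nb2/advent-of-code | day7/__main__.py | getCombValue
-- ===== SOURCE A (Python) =====
-- def getCombValue(c: str, joker: bool) -> int:
--     cmap = dict()
--     for s in c:
--         if s not in cmap:
--             cmap[s] = 0
--         cmap[s] += 1
--     vals = sorted(cmap.values())
--     if joker and 'J' in cmap and len(vals) > 1:
--         if cmap['J'] == vals[-1]:
--             vals[-2] = vals[-2] + cmap['J']
--         else:
--             vals[-1] = vals[-1] + cmap['J']
--         vals.remove(cmap['J'])
--     return sum([v**2 for v in vals])
-- ===== SOURCE B (Python) =====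
-- def getCombValue(c: str, joker: bool) -> int:
--     counts = {}
--     for s in c:
--         counts[s] = counts.get(s, 0) + 1
--     if joker and 'J' in counts and len(counts) > 1:
--         j = counts.pop('J')
--         best = max(counts, key=counts.get)
--         counts[best] += j
--     return sum(v * v for v in counts.values())
-- ===== Notes on version B (the rewrite author's own statement) =====
-- stated objective: simpler
-- what changed: B drops the sort and the vals[-1]/vals[-2]/remove index surgery entirely: it pops the joker count from the frequency dict and adds it to the group found by a direct max-lookup over the remaining counts, then sums the squares.
import Mathlib
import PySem

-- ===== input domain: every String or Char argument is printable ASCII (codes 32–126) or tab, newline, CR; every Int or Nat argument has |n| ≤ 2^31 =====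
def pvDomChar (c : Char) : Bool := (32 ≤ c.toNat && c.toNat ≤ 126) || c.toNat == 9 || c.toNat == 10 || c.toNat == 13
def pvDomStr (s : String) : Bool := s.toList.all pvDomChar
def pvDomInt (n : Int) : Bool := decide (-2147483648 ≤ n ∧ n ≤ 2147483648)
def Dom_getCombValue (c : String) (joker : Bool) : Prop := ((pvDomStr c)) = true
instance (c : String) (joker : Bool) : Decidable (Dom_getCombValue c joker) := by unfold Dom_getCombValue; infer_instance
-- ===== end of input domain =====

-- B replaces A's sort + vals[-1]/vals[-2]/remove index surgery by popping the joker count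
-- from the frequency dict and adding it to the group found by a direct max-lookup (simpler).

-- ===== PORT A =====
def getCombValue (c : String) (joker : Bool) : Int :=
  let cmap := c.toList.foldl (fun d s =>
      let d := if d.contains s then d else d.insert s (0 : Int)   -- if s not in cmap: cmap[s] = 0
      d.insert s (d.getD s 0 + 1)) PySem.Dict.empty               -- cmap[s] += 1 (key present here)
  let vals := PySem.List.sorted cmap.values (fun v => v) false
  let vals :=
    if joker && cmap.contains 'J' && decide (1 < vals.length) then
      let j := cmap.getD 'J' 0                                    -- cmap['J'] (present by the guard)
      let vals :=
        if j = PySem.List.pyGetD vals (-1) 0 then                 -- cmap['J'] == vals[-1] (in range by the guard)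
          PySem.List.pySetD vals (-2) (PySem.List.pyGetD vals (-2) 0 + j)
        else
          PySem.List.pySetD vals (-1) (PySem.List.pyGetD vals (-1) 0 + j)
      (PySem.List.remove? vals j).getD vals                       -- vals.remove(cmap['J']); j ∈ vals under the guard
    else vals
  (vals.map (fun v => v ^ 2)).sum

-- ===== PORT B =====
def getCombValue_alt (c : String) (joker : Bool) : Int :=
  let counts := c.toList.foldl (fun d s => d.insert s (d.getD s 0 + 1)) (PySem.Dict.empty : PySem.Dict Char Int)
  let counts :=
    if joker && counts.contains 'J' && decide (1 < counts.size) then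
      let j := counts.getD 'J' 0                                  -- counts.pop('J') (present by the guard)
      let e := counts.erase 'J'
      match PySem.List.max? e.keys (fun k => e.getD k 0) with     -- max(counts, key=counts.get)
      | some best => e.insert best (e.getD best 0 + j)            -- counts[best] += j
      | none => e                                                 -- unreachable: e is nonempty under the guard
    else counts
  (counts.values.map (fun v => v * v)).sum

-- ===== PRECONDITION & SPEC =====
def Spec_getCombValue (c : String) (joker : Bool) (out : Int) : Prop := out = getCombValue_alt c joker
instance (c : String) (joker : Bool) (out : Int) : Decidable (Spec_getCombValue c joker out) := by unfold Spec_getCombValue; infer_instance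

-- ===== CLAIM (what is proved, stated in full; the proofs are below) =====
def Claim_equal_getCombValue : Prop := ∀ (c : String) (joker : Bool), Dom_getCombValue c joker → Spec_getCombValue c joker (getCombValue c joker)

-- ===== LEMMAS AND PROOFS =====

-- sum of squares, the quantity both programs return
def pvSumSq (l : List Int) : Int := (l.map (fun v => v ^ 2)).sum

theorem pvSumSq_mul (l : List Int) : (l.map (fun v => v * v)).sum = pvSumSq l := by
  unfold pvSumSq
  have : (fun v : Int => v * v) = fun v : Int => v ^ 2 := funext fun v => (pow_two v).symm
  rw [this]

theorem pvSumSq_perm {l₁ l₂ : List Int} (h : l₁.Perm l₂) : pvSumSq l₁ = pvSumSq l₂ :=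
  (h.map _).sum_eq

theorem pvSumSq_cons (a : Int) (l : List Int) : pvSumSq (a :: l) = a ^ 2 + pvSumSq l := by
  simp [pvSumSq]

theorem pvSumSq_erase {l : List Int} {a : Int} (h : a ∈ l) :
    pvSumSq (l.erase a) = pvSumSq l - a ^ 2 := by
  have := pvSumSq_perm (List.perm_cons_erase h)
  rw [pvSumSq_cons] at this
  omega

theorem pvSumSq_set (l : List Int) (n : ℕ) (a : Int) (hn : n < l.length) :
    pvSumSq (l.set n a) = pvSumSq l - l[n] ^ 2 + a ^ 2 := by
  induction l generalizing n with
  | nil => simp at hn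
  | cons x t ih =>
    cases n with
    | zero => simp [pvSumSq_cons]; ring
    | succ m =>
      simp only [List.set_cons_succ, pvSumSq_cons, List.getElem_cons_succ]
      rw [ih m (by simpa using hn)]
      ring

-- A's counting loop (membership test, then increment) equals B's get-based loop, dict for dict
theorem pvFoldCountEq (l : List Char) (d : PySem.Dict Char Int) :
    l.foldl (fun d s =>
      let d' := if d.contains s then d else d.insert s (0 : Int)
      d'.insert s (d'.getD s 0 + 1)) d
    = l.foldl (fun d s => d.insert s (d.getD s 0 + 1)) d := by
  induction l generalizing d with
  | nil => rfl
  | cons x t ih =>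
    simp only [List.foldl_cons]
    rw [show (let d' := if d.contains x then d else d.insert x (0 : Int)
              d'.insert x (d'.getD x 0 + 1)) = d.insert x (d.getD x 0 + 1) from ?_]
    · exact ih _
    · by_cases h : d.contains x = true
      · simp [h]
      · simp only [Bool.not_eq_true] at h
        simp only [h, if_neg Bool.false_ne_true]
        rw [PySem.Dict.getD_insert_self, PySem.Dict.insert_insert_self,
          PySem.Dict.getD_of_not_contains d 0 h]

-- splitting a dict at one of its entries: values ~ that value :: values-of-erase (raw items form)
theorem pvRawSplit (l : List (Char × Int)) (k : Char) (v : Int)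
    (hnd : (l.map Prod.fst).Nodup) (hm : (k, v) ∈ l) :
    (l.map Prod.snd).Perm (v :: ((l.filter (fun p => !(p.1 == k))).map Prod.snd)) := by
  induction l with
  | nil => simp at hm
  | cons a t ih =>
    rcases List.mem_cons.mp hm with h | h
    · subst h
      have hknot : ∀ p ∈ t, (!(p.1 == k)) = true := by
        intro p hp
        have : k ∉ t.map Prod.fst := by simpa using (List.nodup_cons.mp hnd).1
        simp only [Bool.not_eq_eq_eq_not, Bool.not_true, beq_eq_false_iff_ne]
        intro hpk; exact this (List.mem_map.mpr ⟨p, hp, hpk⟩)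
      rw [List.filter_cons_of_neg (by simp)]
      rw [List.filter_eq_self.mpr hknot]
      simp
    · have hak : a.1 ≠ k := by
        intro heq
        have : k ∉ t.map Prod.fst := by
          have := (List.nodup_cons.mp hnd).1; simpa [heq] using this
        exact this (List.mem_map.mpr ⟨(k, v), h, rfl⟩)
      rw [List.filter_cons_of_pos (by simpa using hak)]
      simp only [List.map_cons]
      exact ((ih (List.nodup_cons.mp hnd).2 h).cons a.2).trans (List.Perm.swap v a.2 _)

theorem pvSplit (d : PySem.Dict Char Int) (k : Char) (v : Int)
    (hnd : d.keys.Nodup) (hm : (k, v) ∈ d.items) :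
    d.values.Perm (v :: (d.erase k).values) :=
  pvRawSplit d.items k v hnd hm

-- overwriting an existing key: values ~ new value :: values-of-erase (raw items form)
theorem pvRawReplace (l : List (Char × Int)) (k : Char) (w : Int)
    (hnd : (l.map Prod.fst).Nodup) (hm : ∃ v, (k, v) ∈ l) :
    ((l.map (fun p => if p.1 == k then (k, w) else p)).map Prod.snd).Perm
      (w :: ((l.filter (fun p => !(p.1 == k))).map Prod.snd)) := by
  induction l with
  | nil => simp at hm
  | cons a t ih =>
    obtain ⟨v, hv⟩ := hm
    rcases List.mem_cons.mp hv with h | h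
    · subst h
      have hknot : ∀ p ∈ t, (!(p.1 == k)) = true := by
        intro p hp
        have : k ∉ t.map Prod.fst := by simpa using (List.nodup_cons.mp hnd).1
        simp only [Bool.not_eq_eq_eq_not, Bool.not_true, beq_eq_false_iff_ne]
        intro hpk; exact this (List.mem_map.mpr ⟨p, hp, hpk⟩)
      rw [List.filter_cons_of_neg (by simp), List.filter_eq_self.mpr hknot]
      have hmap : (t.map (fun p => if p.1 == k then (k, w) else p)) = t := by
        conv_rhs => rw [← List.map_id t]
        apply List.map_congr_left
        intro p hp
        have hknott : k ∉ t.map Prod.fst := by simpa using (List.nodup_cons.mp hnd).1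
        have hpk : (p.1 == k) = false := by
          simp only [beq_eq_false_iff_ne]
          intro hpk; exact hknott (List.mem_map.mpr ⟨p, hp, hpk⟩)
        simp [hpk]
      have hshape : (((k, v) :: t).map (fun p => if p.1 == k then (k, w) else p)).map Prod.snd
          = w :: t.map Prod.snd := by rw [List.map_cons, hmap]; simp
      rw [hshape]
    · have hak : a.1 ≠ k := by
        intro heq
        have : k ∉ t.map Prod.fst := by
          have := (List.nodup_cons.mp hnd).1; simpa [heq] using this
        exact this (List.mem_map.mpr ⟨(k, v), h, rfl⟩)
      rw [List.filter_cons_of_pos (by simpa using hak)]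
      have hbeq : (a.1 == k) = false := by simpa using hak
      simp only [List.map_cons, hbeq, Bool.false_eq_true, if_false]
      exact ((ih (List.nodup_cons.mp hnd).2 ⟨v, h⟩).cons a.2).trans (List.Perm.swap w a.2 _)

theorem pvValuesInsertPerm (d : PySem.Dict Char Int) (k : Char) (w : Int)
    (hnd : d.keys.Nodup) (hm : ∃ v, (k, v) ∈ d.items) :
    (d.insert k w).values.Perm (w :: (d.erase k).values) := by
  have hc : d.contains k = true := by
    obtain ⟨v, hv⟩ := hm
    simp only [PySem.Dict.contains, List.any_eq_true]
    exact ⟨(k, v), hv, by simp⟩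
  simp only [PySem.Dict.insert, hc, if_true, PySem.Dict.values, PySem.Dict.erase]
  exact pvRawReplace d.items k w hnd hm

theorem pvKeysEraseSublist (d : PySem.Dict Char Int) (k : Char) :
    (d.erase k).keys.Sublist d.keys :=
  List.filter_sublist.map _

-- Python's negative indexing/assignment at -1 and -2, made explicit
theorem pvPyGetD_neg_one (l : List Int) (h : 0 < l.length) (dflt : Int) :
    PySem.List.pyGetD l (-1) dflt = l[l.length - 1]'(by omega) := by
  simp only [PySem.List.pyGetD, PySem.List.pyGet?, PySem.List.pyIdx?]
  rw [if_neg (by omega), if_pos (by omega : -(l.length : Int) ≤ -1)]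
  simp [List.getElem?_eq_getElem (by omega : l.length - 1 < l.length)]

theorem pvPyGetD_neg_two (l : List Int) (h : 2 ≤ l.length) (dflt : Int) :
    PySem.List.pyGetD l (-2) dflt = l[l.length - 2]'(by omega) := by
  simp only [PySem.List.pyGetD, PySem.List.pyGet?, PySem.List.pyIdx?]
  rw [if_neg (by omega), if_pos (by omega : -(l.length : Int) ≤ -2)]
  simp [List.getElem?_eq_getElem (by omega : l.length - 2 < l.length)]

theorem pvPySetD_neg_one (l : List Int) (h : 0 < l.length) (v : Int) :
    PySem.List.pySetD l (-1) v = l.set (l.length - 1) v := by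
  simp only [PySem.List.pySetD, PySem.List.pySet?, PySem.List.pyIdx?]
  rw [if_neg (by omega), if_pos (by omega : -(l.length : Int) ≤ -1)]
  simp

theorem pvPySetD_neg_two (l : List Int) (h : 2 ≤ l.length) (v : Int) :
    PySem.List.pySetD l (-2) v = l.set (l.length - 2) v := by
  simp only [PySem.List.pySetD, PySem.List.pySet?, PySem.List.pyIdx?]
  rw [if_neg (by omega), if_pos (by omega : -(l.length : Int) ≤ -2)]
  simp

-- every element of sorted(vs) is at most its last element
theorem pvSortedLastMax (vs : List Int) (x : Int)
    (hx : x ∈ PySem.List.sorted vs (fun v => v) false)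
    (h : 0 < (PySem.List.sorted vs (fun v => v) false).length) :
    x ≤ (PySem.List.sorted vs (fun v => v) false)[(PySem.List.sorted vs (fun v => v) false).length - 1]'(by omega) := by
  obtain ⟨i, hi, rfl⟩ := List.mem_iff_getElem.mp hx
  exact PySem.List.sorted_id_getElem_mono vs (by omega) (by omega)

-- the whole computation after the counting loop, over an arbitrary count dict with distinct keys
theorem pvTailEq (d : PySem.Dict Char Int) (joker : Bool) (hnd : d.keys.Nodup) :
    (let vals := PySem.List.sorted d.values (fun v => v) false
     let vals :=
       if joker && d.contains 'J' && decide (1 < vals.length) then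
         let j := d.getD 'J' 0
         let vals :=
           if j = PySem.List.pyGetD vals (-1) 0 then
             PySem.List.pySetD vals (-2) (PySem.List.pyGetD vals (-2) 0 + j)
           else
             PySem.List.pySetD vals (-1) (PySem.List.pyGetD vals (-1) 0 + j)
         (PySem.List.remove? vals j).getD vals
       else vals
     (vals.map (fun v => v ^ 2)).sum)
    =
    (let counts :=
       if joker && d.contains 'J' && decide (1 < d.size) then
         let j := d.getD 'J' 0
         let e := d.erase 'J'
         match PySem.List.max? e.keys (fun k => e.getD k 0) with
         | some best => e.insert best (e.getD best 0 + j)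
         | none => e
       else d
     (counts.values.map (fun v => v * v)).sum) := by
  have hvallen : d.values.length = d.size := List.length_map ..
  have hvlen : (PySem.List.sorted d.values (fun v => v) false).length = d.size := by
    rw [PySem.List.length_sorted]; exact hvallen
  by_cases hg : (joker && d.contains 'J' && decide (1 < d.size)) = true
  · -- joker branch taken on both sides
    simp only [hvlen, hg, if_true]
    have hg' := hg
    simp only [Bool.and_eq_true, decide_eq_true_eq] at hg'
    have hcontJ : d.contains 'J' = true := hg'.1.2
    have hsz : 1 < d.size := hg'.2
    obtain ⟨j0, hj0⟩ : ∃ v, d.get? 'J' = some v := by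
      have h := PySem.Dict.contains_eq_isSome_get? d 'J'
      rw [hcontJ] at h
      exact Option.isSome_iff_exists.mp h.symm
    have hjval : d.getD 'J' 0 = j0 := by simp [PySem.Dict.getD, hj0]
    rw [hjval]
    set vals := PySem.List.sorted d.values (fun v => v) false with hvals
    set e := d.erase 'J' with he
    have hmemJ : ('J', j0) ∈ d.items := PySem.Dict.mem_items_of_get?_eq_some d hj0
    have hjv : j0 ∈ d.values := List.mem_map.mpr ⟨('J', j0), hmemJ, rfl⟩
    have hsplit : d.values.Perm (j0 :: e.values) := pvSplit d 'J' j0 hnd hmemJ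
    have hevlen : e.values.length = d.size - 1 := by
      have := hsplit.length_eq
      simp only [List.length_cons] at this
      omega
    have heklen : e.keys.length = d.size - 1 := by
      have h1 : e.keys.length = e.values.length := by
        simp [PySem.Dict.keys, PySem.Dict.values]
      omega
    have hvperm : vals.Perm d.values := PySem.List.sorted_perm _ _ _
    have hjvals : j0 ∈ vals := hvperm.mem_iff.mpr hjv
    have hn : vals.length = d.size := hvlen
    -- B side: the max-lookup succeeds and names a key holding the maximal remaining count
    obtain ⟨best, hmax⟩ : ∃ b, PySem.List.max? e.keys (fun k => e.getD k 0) = some b := by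
      cases hmx : PySem.List.max? e.keys (fun k => e.getD k 0) with
      | none =>
        have : e.keys = [] := (PySem.List.max?_eq_none_iff _ _).mp hmx
        rw [this] at heklen
        simp at heklen
        omega
      | some b => exact ⟨b, rfl⟩
    rw [hmax]
    have hnde : e.keys.Nodup := hnd.sublist (pvKeysEraseSublist d 'J')
    have hbk : best ∈ e.keys := PySem.List.max?_mem hmax
    obtain ⟨m0, hm0⟩ : ∃ v, e.get? best = some v := by
      have hc : e.contains best = true := (PySem.Dict.contains_iff_mem_keys e best).mpr hbk
      have h := PySem.Dict.contains_eq_isSome_get? e best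
      rw [hc] at h
      exact Option.isSome_iff_exists.mp h.symm
    have hmval : e.getD best 0 = m0 := by simp [PySem.Dict.getD, hm0]
    have hmemB : (best, m0) ∈ e.items := PySem.Dict.mem_items_of_get?_eq_some e hm0
    have hBsplit : e.values.Perm (m0 :: (e.erase best).values) := pvSplit e best m0 hnde hmemB
    have hBins : (e.insert best (e.getD best 0 + j0)).values.Perm
        ((e.getD best 0 + j0) :: (e.erase best).values) :=
      pvValuesInsertPerm e best _ hnde ⟨m0, hmemB⟩
    have hmBound : ∀ w ∈ e.values, w ≤ m0 := by
      intro w hw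
      rw [PySem.Dict.values_eq_map_keys e hnde 0] at hw
      obtain ⟨k, hk, rfl⟩ := List.mem_map.mp hw
      have := PySem.List.max?_isMax hmax k hk
      rwa [hmval] at this
    have hmMem : m0 ∈ e.values := List.mem_map.mpr ⟨(best, m0), hmemB, rfl⟩
    -- B's sum of squares
    have hB : ((e.insert best (e.getD best 0 + j0)).values.map (fun v => v * v)).sum
        = pvSumSq d.values - j0 ^ 2 - m0 ^ 2 + (m0 + j0) ^ 2 := by
      rw [pvSumSq_mul, pvSumSq_perm hBins, pvSumSq_cons, hmval]
      have h1 : pvSumSq d.values = j0 ^ 2 + pvSumSq e.values := by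
        rw [pvSumSq_perm hsplit, pvSumSq_cons]
      have h2 : pvSumSq e.values = m0 ^ 2 + pvSumSq (e.erase best).values := by
        rw [pvSumSq_perm hBsplit, pvSumSq_cons]
      linarith
    -- common facts about the erased multiset
    have hEperm : e.values.Perm (vals.erase j0) := by
      have h1 : e.values.Perm (d.values.erase j0) :=
        (hsplit.symm.trans (List.perm_cons_erase hjv)).cons_inv
      exact h1.trans (hvperm.erase j0).symm
    have hSvals : pvSumSq vals = pvSumSq d.values := pvSumSq_perm hvperm
    rw [hB]
    -- A side
    by_cases hc : j0 = PySem.List.pyGetD vals (-1) 0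
    · -- cmap['J'] is (one of) the largest group(s); A bumps vals[-2]
      rw [if_pos hc]
      have h2n : 2 ≤ vals.length := by omega
      have hM : PySem.List.pyGetD vals (-1) 0 = vals[vals.length - 1]'(by omega) :=
        pvPyGetD_neg_one vals (by omega) 0
      have hset : PySem.List.pySetD vals (-2) (PySem.List.pyGetD vals (-2) 0 + j0)
          = vals.set (vals.length - 2) (vals[vals.length - 2]'(by omega) + j0) := by
        rw [pvPyGetD_neg_two vals h2n 0, pvPySetD_neg_two vals h2n]
      rw [hset]
      have hjL : j0 ∈ vals.set (vals.length - 2) (vals[vals.length - 2]'(by omega) + j0) := by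
        have hlt : vals.length - 1
            < (vals.set (vals.length - 2) (vals[vals.length - 2]'(by omega) + j0)).length := by
          simp
          omega
        have h1 : (vals.set (vals.length - 2)
            (vals[vals.length - 2]'(by omega) + j0))[vals.length - 1]'hlt = j0 := by
          rw [List.getElem_set_ne (by omega), ← hM]
          exact hc.symm
        have h2 := List.getElem_mem hlt
        rwa [h1] at h2
      rw [PySem.List.remove?_eq_some_erase _ j0 hjL, Option.getD_some]
      have hA : (((vals.set (vals.length - 2)
            (vals[vals.length - 2]'(by omega) + j0)).erase j0).map (fun v => v ^ 2)).sum
          = pvSumSq vals - (vals[vals.length - 2]'(by omega)) ^ 2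
            + (vals[vals.length - 2]'(by omega) + j0) ^ 2 - j0 ^ 2 := by
        rw [show (((vals.set (vals.length - 2)
            (vals[vals.length - 2]'(by omega) + j0)).erase j0).map (fun v => v ^ 2)).sum
          = pvSumSq ((vals.set (vals.length - 2)
            (vals[vals.length - 2]'(by omega) + j0)).erase j0) from rfl]
        rw [pvSumSq_erase hjL, pvSumSq_set vals _ _ (by omega)]
      rw [hA, hSvals]
      -- m0 = vals[len-2]: both are the maximum of the counts left after removing the joker group
      have hmeq : m0 = vals[vals.length - 2]'(by omega) := by
        have hvne : vals ≠ [] := by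
          intro hnil; rw [hnil] at hn; simp at hn; omega
        have hlast : vals.getLast hvne = vals[vals.length - 1]'(by omega) :=
          List.getLast_eq_getElem hvne
        have hjlast : vals[vals.length - 1]'(by omega) = j0 := by rw [← hM, ← hc]
        have hdperm : (vals.erase j0).Perm vals.dropLast := by
          have h1 : vals.Perm (j0 :: vals.dropLast) := by
            conv_lhs => rw [← List.dropLast_append_getLast hvne]
            rw [hlast, hjlast]
            exact List.perm_append_singleton _ _
          exact ((List.perm_cons_erase hjvals).symm.trans h1).cons_inv
        have hdl : vals.dropLast.length = vals.length - 1 := by simp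
        have hs2mem : vals[vals.length - 2]'(by omega) ∈ vals.dropLast := by
          have hlt2 : vals.length - 2 < vals.dropLast.length := by omega
          have h3 : vals.dropLast[vals.length - 2]'hlt2 = vals[vals.length - 2]'(by omega) :=
            List.getElem_dropLast _
          have h4 := List.getElem_mem hlt2
          rwa [h3] at h4
        have hs2bd : ∀ x ∈ vals.dropLast, x ≤ vals[vals.length - 2]'(by omega) := by
          intro x hx
          obtain ⟨i, hi, rfl⟩ := List.mem_iff_getElem.mp hx
          have hi' : i < vals.length - 1 := by rw [hdl] at hi; exact hi
          rw [List.getElem_dropLast]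
          exact PySem.List.sorted_id_getElem_mono d.values (by omega) (by rw [← hvals]; omega)
        have hmle : m0 ≤ vals[vals.length - 2]'(by omega) :=
          hs2bd m0 (hdperm.mem_iff.mp (hEperm.mem_iff.mp hmMem))
        have hle : vals[vals.length - 2]'(by omega) ≤ m0 :=
          hmBound _ (hEperm.mem_iff.mpr (hdperm.mem_iff.mpr hs2mem))
        omega
      rw [← hmeq]
      ring
    · -- cmap['J'] is not the largest group; A bumps vals[-1]
      rw [if_neg hc]
      have h2n : 2 ≤ vals.length := by omega
      have hM : PySem.List.pyGetD vals (-1) 0 = vals[vals.length - 1]'(by omega) :=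
        pvPyGetD_neg_one vals (by omega) 0
      have hset : PySem.List.pySetD vals (-1) (PySem.List.pyGetD vals (-1) 0 + j0)
          = vals.set (vals.length - 1) (vals[vals.length - 1]'(by omega) + j0) := by
        rw [hM, pvPySetD_neg_one vals (by omega)]
      rw [hset]
      have hjne : j0 ≠ vals[vals.length - 1]'(by omega) := by rw [← hM]; exact hc
      have hjL : j0 ∈ vals.set (vals.length - 1) (vals[vals.length - 1]'(by omega) + j0) := by
        obtain ⟨i, hi, hival⟩ := List.mem_iff_getElem.mp hjvals
        have hine : i ≠ vals.length - 1 := by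
          intro heq
          subst heq
          exact hjne hival.symm
        have hlt : i < (vals.set (vals.length - 1)
            (vals[vals.length - 1]'(by omega) + j0)).length := by simpa using hi
        have h1 : (vals.set (vals.length - 1)
            (vals[vals.length - 1]'(by omega) + j0))[i]'hlt = j0 := by
          rw [List.getElem_set_ne (by omega)]
          exact hival
        have h2 := List.getElem_mem hlt
        rwa [h1] at h2
      rw [PySem.List.remove?_eq_some_erase _ j0 hjL, Option.getD_some]
      have hA : (((vals.set (vals.length - 1)
            (vals[vals.length - 1]'(by omega) + j0)).erase j0).map (fun v => v ^ 2)).sum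
          = pvSumSq vals - (vals[vals.length - 1]'(by omega)) ^ 2
            + (vals[vals.length - 1]'(by omega) + j0) ^ 2 - j0 ^ 2 := by
        rw [show (((vals.set (vals.length - 1)
            (vals[vals.length - 1]'(by omega) + j0)).erase j0).map (fun v => v ^ 2)).sum
          = pvSumSq ((vals.set (vals.length - 1)
            (vals[vals.length - 1]'(by omega) + j0)).erase j0) from rfl]
        rw [pvSumSq_erase hjL, pvSumSq_set vals _ _ (by omega)]
      rw [hA, hSvals]
      -- m0 = vals[len-1]: the largest group survives the removal of the joker group
      have hmeq : m0 = vals[vals.length - 1]'(by omega) := by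
        have hMvals : vals[vals.length - 1]'(by omega) ∈ vals := List.getElem_mem _
        have hMerase : vals[vals.length - 1]'(by omega) ∈ vals.erase j0 :=
          (List.mem_erase_of_ne (fun h => hjne h.symm)).mpr hMvals
        have hle : vals[vals.length - 1]'(by omega) ≤ m0 :=
          hmBound _ (hEperm.mem_iff.mpr hMerase)
        have hmle : m0 ≤ vals[vals.length - 1]'(by omega) := by
          have hmvals : m0 ∈ vals :=
            List.mem_of_mem_erase (hEperm.mem_iff.mp hmMem)
          exact pvSortedLastMax d.values m0 hmvals (by rw [← hvals]; omega)
        omega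
      rw [← hmeq]
      ring
  · -- joker branch not taken on either side
    simp only [Bool.not_eq_true] at hg
    simp only [hvlen, hg, if_false, Bool.false_eq_true]
    rw [pvSumSq_mul]
    exact pvSumSq_perm (PySem.List.sorted_perm _ _ _)

-- ===== VERDICT helper: the main equivalence =====
theorem getCombValue_spec : Claim_equal_getCombValue := by
  intro c joker _
  unfold Spec_getCombValue getCombValue getCombValue_alt
  rw [pvFoldCountEq]
  exact pvTailEq _ joker
    (PySem.Dict.nodup_keys_foldl_insert _ _ _ (by simp [PySem.Dict.keys_empty]))
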